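-- pv_equiv track=rewrite | github.com/leiacf/AoC2025 | src/02.py | hasSeveralRepeating
-- ===== SOURCE A (Python) =====
-- def hasSeveralRepeating(number):
--
--     num = str(number)
--
--     for segment in range(1, len(num)):
--
--         if len(num) % segment == 0:
--             test = num[0:segment]
--
--             if num.count(test) == len(num) // segment:
--                 return True
--
--     return False
-- ===== SOURCE B (Python) =====
-- def hasSeveralRepeating(number):
--     num = str(number)
--     return num in (num + num)[1:-1]
-- ===== Notes on version B (the rewrite author's own statement) =====
-- stated objective: idiomatic
-- what changed: A's loop over candidate segment lengths with a str.count test is replaced by the standard one-line repeated-substring idiom: num is a repetition of a proper block iff num occurs in (num + num)[1:-1].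
import Mathlib
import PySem

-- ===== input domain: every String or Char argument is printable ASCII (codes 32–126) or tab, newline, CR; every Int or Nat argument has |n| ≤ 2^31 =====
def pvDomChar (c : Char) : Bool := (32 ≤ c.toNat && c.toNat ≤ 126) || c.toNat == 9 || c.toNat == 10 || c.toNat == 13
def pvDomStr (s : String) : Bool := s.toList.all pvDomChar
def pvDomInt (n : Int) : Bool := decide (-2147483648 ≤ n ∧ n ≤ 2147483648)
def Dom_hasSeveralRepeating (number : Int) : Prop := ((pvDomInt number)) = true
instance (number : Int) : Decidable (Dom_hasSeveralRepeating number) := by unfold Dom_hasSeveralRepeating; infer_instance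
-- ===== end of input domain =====

-- B replaces A's loop over candidate segment lengths (with its str.count test) by the
-- standard repeated-substring idiom `num in (num + num)[1:-1]` (objective: idiomatic).

-- ===== PORT A =====
def hasSeveralRepeating (number : Int) : Bool :=
  let num := PySem.Int.toStr number
  (PySem.List.pyRange 1 (PySem.Str.len num)).any (fun segment =>
    PySem.Int.mod (PySem.Str.len num) segment == 0 &&
      ((PySem.Str.count num (PySem.Str.slice num (some 0) (some segment)) : Int)
        == PySem.Int.floordiv (PySem.Str.len num) segment))

-- ===== PORT B =====
-- Python's `num + num` (string concatenation) ported exactly as concatenation of the character lists.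
def strConcat (a b : String) : String := String.ofList (a.toList ++ b.toList)

def hasSeveralRepeating_alt (number : Int) : Bool :=
  let num := PySem.Int.toStr number
  PySem.Str.isIn num (PySem.Str.slice (strConcat num num) (some 1) (some (-1)))

-- ===== PRECONDITION & SPEC =====
def Spec_hasSeveralRepeating (number : Int) (out : Bool) : Prop := out = hasSeveralRepeating_alt number
instance (number : Int) (out : Bool) : Decidable (Spec_hasSeveralRepeating number out) := by unfold Spec_hasSeveralRepeating; infer_instance

-- ===== CLAIM (what is proved, stated in full; the proofs are below) =====
def Claim_equal_hasSeveralRepeating : Prop := ∀ (number : Int), Dom_hasSeveralRepeating number → Spec_hasSeveralRepeating number (hasSeveralRepeating number)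

-- ===== LEMMAS AND PROOFS =====

-- `t` repeated `k` times.
def strPow (t : List Char) (k : ℕ) : List Char := (List.replicate k t).flatten

theorem strPow_succ (t : List Char) (k : ℕ) : strPow t (k+1) = t ++ strPow t k := by
  simp [strPow, List.replicate_succ]

theorem strPow_comm (t : List Char) (k : ℕ) : strPow t k ++ t = t ++ strPow t k := by
  induction k with
  | zero => simp [strPow]
  | succ k ih => rw [strPow_succ, List.append_assoc, ih]

-- Unfolding equations for PySem.Chars.count.go (definitional).
theorem countGo_cons (t l : List Char) (c : Char) (f acc : ℕ) :
    PySem.Chars.count.go t (f+1) (c::l) acc =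
      if t.isPrefixOf (c::l) then PySem.Chars.count.go t f (List.drop t.length (c::l)) (acc+1)
      else PySem.Chars.count.go t f l acc := rfl

theorem countGo_le (t : List Char) (ht : t ≠ []) :
    ∀ (fuel : ℕ) (l : List Char) (acc : ℕ), l.length ≤ fuel →
      PySem.Chars.count.go t fuel l acc ≤ acc + l.length / t.length := by
  intro fuel
  have htp : 0 < t.length := List.length_pos_iff.mpr ht
  induction fuel with
  | zero =>
    intro l acc hl
    have : l = [] := List.eq_nil_of_length_eq_zero (by omega)
    subst this; simp [PySem.Chars.count.go]
  | succ f ih =>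
    intro l acc hl
    cases l with
    | nil => simp [PySem.Chars.count.go]
    | cons c l' =>
      rw [countGo_cons]
      split
      · rename_i hpre
        have hple : t.length ≤ (c::l').length := (List.isPrefixOf_iff_prefix.mp hpre).length_le
        have h1 := ih (List.drop t.length (c::l')) (acc+1) (by simp only [List.length_drop, List.length_cons] at hl ⊢; omega)
        refine le_trans h1 ?_
        rw [List.length_drop]
        have : ((c::l').length - t.length) / t.length + 1 = (c::l').length / t.length := by
          rw [← Nat.add_div_right _ htp, Nat.sub_add_cancel hple]
        omega
      · have h1 := ih l' acc (by simp at hl ⊢; omega)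
        refine le_trans h1 ?_
        have : l'.length / t.length ≤ (c::l').length / t.length :=
          Nat.div_le_div_right (by simp)
        omega

theorem countGo_eq_iff (t : List Char) (ht : t ≠ []) :
    ∀ (fuel : ℕ) (l : List Char) (acc : ℕ), t.length ∣ l.length → l.length ≤ fuel →
      (PySem.Chars.count.go t fuel l acc = acc + l.length / t.length ↔
        l = strPow t (l.length / t.length)) := by
  intro fuel
  have htp : 0 < t.length := List.length_pos_iff.mpr ht
  induction fuel with
  | zero =>
    intro l acc hd hl
    have : l = [] := List.eq_nil_of_length_eq_zero (by omega)
    subst this; simp [PySem.Chars.count.go, strPow]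
  | succ f ih =>
    intro l acc hd hl
    cases l with
    | nil => simp [PySem.Chars.count.go, strPow]
    | cons c l' =>
      have hlen : 0 < (c::l').length := by simp
      have hple : t.length ≤ (c::l').length := Nat.le_of_dvd hlen hd
      have hk : 0 < (c::l').length / t.length := Nat.div_pos hple htp
      rw [countGo_cons]
      split
      · rename_i hpre
        -- t is a prefix: c::l' = t ++ rest
        have hpre' : t <+: (c::l') := List.isPrefixOf_iff_prefix.mp hpre
        obtain ⟨rest, hrest⟩ := hpre'
        have hdl : List.drop t.length (c::l') = rest := by
          rw [← hrest, List.drop_left]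
        have hrl : rest.length = (c::l').length - t.length := by
          rw [← hrest]; simp
        have hd' : t.length ∣ rest.length := by
          rw [hrl]; exact (Nat.dvd_sub hd dvd_rfl)
        have harith : rest.length / t.length + 1 = (c::l').length / t.length := by
          rw [hrl, ← Nat.add_div_right _ htp, Nat.sub_add_cancel hple]
        have h1 := ih rest (acc+1) hd' (by rw [hrl]; omega)
        rw [hdl]
        constructor
        · intro h
          have : PySem.Chars.count.go t f rest (acc+1) = (acc+1) + rest.length / t.length := by
            omega
          have hrp := h1.mp this
          rw [← harith, strPow_succ, ← hrp]
          exact hrest.symm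
        · intro h
          have hrp : rest = strPow t (rest.length / t.length) := by
            rw [← harith, strPow_succ] at h
            rw [← hrest] at h
            exact (List.append_cancel_left h)
          have := h1.mpr hrp
          omega
      · rename_i hpre
        constructor
        · intro h
          exfalso
          have hle := countGo_le t ht f l' acc (by simp only [List.length_cons] at hl; omega)
          have harith : l'.length / t.length + 1 = (c::l').length / t.length := by
            obtain ⟨k, hkk⟩ := hd
            have hk1 : 1 ≤ k := by
              rcases Nat.eq_zero_or_pos k with hz | hp
              · subst hz; simp at hkk
              · exact hp
            obtain ⟨k', rfl⟩ : ∃ k', k = k' + 1 := ⟨k - 1, by omega⟩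
            have d2 : (c::l').length / t.length = k' + 1 := by
              rw [hkk, Nat.mul_div_cancel_left _ htp]
            have hp1 : l'.length = (t.length - 1) + k' * t.length := by
              have h2 : (c::l').length = l'.length + 1 := by simp
              have h3 : t.length * (k' + 1) = k' * t.length + t.length := by ring
              rw [h3] at hkk
              omega
            have d1 : l'.length / t.length = k' := by
              rw [hp1, Nat.add_mul_div_right _ _ htp, Nat.div_eq_of_lt (by omega)]; omega
            omega
          omega
        · intro h
          exfalso
          obtain ⟨k', hk'⟩ : ∃ k', (c::l').length / t.length = k' + 1 := ⟨(c::l').length / t.length - 1, by omega⟩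
          rw [hk', strPow_succ] at h
          exact hpre (List.isPrefixOf_iff_prefix.mpr ⟨strPow t k', h.symm⟩)

theorem count_eq_iff (s : List Char) (p : ℕ) (hp : 0 < p) (hpn : p ≤ s.length) (_hs : s ≠ [])
    (hdvd : p ∣ s.length) :
    (PySem.Chars.count s (s.take p) = s.length / p ↔ s = strPow (s.take p) (s.length / p)) := by
  have htl : (s.take p).length = p := by
    rw [List.length_take]; omega
  have hne : (s.take p).isEmpty = false := by
    rw [List.isEmpty_eq_false_iff, ← List.length_pos_iff, htl]; exact hp
  rw [PySem.Chars.count, hne]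
  simp only [Bool.false_eq_true, if_false]
  have h := countGo_eq_iff (s.take p) (by rw [← List.length_pos_iff, htl]; exact hp)
    s.length s 0 (by rw [htl]; exact hdvd) (le_refl _)
  rw [htl] at h
  simpa using h

theorem rotate_of_strPow (s : List Char) (p : ℕ) (hp : 0 < p) (hpn : p ≤ s.length)
    (_hdvd : p ∣ s.length) (h : s = strPow (s.take p) (s.length / p)) : s.rotate p = s := by
  have hlp : (s.take p).length = p := by rw [List.length_take]; omega
  rw [List.rotate_eq_drop_append_take hpn]
  obtain ⟨k', hk'⟩ : ∃ k', s.length / p = k' + 1 := by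
    refine ⟨s.length / p - 1, ?_⟩
    have : 0 < s.length / p := Nat.div_pos hpn hp
    omega
  have hdrop : s.drop p = strPow (s.take p) k' := by
    have h2 : s = s.take p ++ strPow (s.take p) k' := by
      conv_lhs => rw [h, hk', strPow_succ]
    conv_lhs => rw [h2]
    rw [List.drop_append_of_le_length (by omega), List.drop_eq_nil_of_le (by omega),
      List.nil_append]
  rw [hdrop]
  calc strPow (s.take p) k' ++ s.take p = s.take p ++ strPow (s.take p) k' := strPow_comm _ _
    _ = strPow (s.take p) (k' + 1) := (strPow_succ _ _).symm
    _ = s := by rw [← hk', ← h]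

theorem strPow_of_comm_aux (t : List Char) (ht : t ≠ []) :
    ∀ (n : ℕ) (w : List Char), w.length ≤ n → t ++ w = w ++ t → t.length ∣ w.length →
      w = strPow t (w.length / t.length) := by
  have htp : 0 < t.length := List.length_pos_iff.mpr ht
  intro n
  induction n with
  | zero =>
    intro w hw _ _
    have : w = [] := List.eq_nil_of_length_eq_zero (by omega)
    subst this; simp [strPow]
  | succ n ih =>
    intro w hw hcomm hdvd
    rcases Nat.eq_zero_or_pos w.length with hz | hpos
    · have : w = [] := List.eq_nil_of_length_eq_zero hz
      subst this; simp [strPow]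
    · have hple : t.length ≤ w.length := Nat.le_of_dvd hpos hdvd
      have hpre : w.take t.length = t := by
        have h1 : (t ++ w).take t.length = t := List.take_left
        rw [hcomm, List.take_append, Nat.sub_eq_zero_of_le hple, List.take_zero,
          List.append_nil] at h1
        exact h1
      -- w = t ++ w'
      set w' := w.drop t.length with hw'
      have hsplit : w = t ++ w' := by
        conv_lhs => rw [← List.take_append_drop t.length w, hpre]
      have hcomm' : t ++ w' = w' ++ t := by
        have : t ++ (t ++ w') = (t ++ w') ++ t := by rw [← hsplit]; exact hcomm
        rw [List.append_assoc] at this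
        exact List.append_cancel_left this
      have hlw' : w'.length = w.length - t.length := by rw [hw', List.length_drop]
      have hdvd' : t.length ∣ w'.length := by rw [hlw']; exact Nat.dvd_sub hdvd dvd_rfl
      have hrec := ih w' (by omega) hcomm' hdvd'
      have harith : w'.length / t.length + 1 = w.length / t.length := by
        rw [hlw', ← Nat.add_div_right _ htp, Nat.sub_add_cancel hple]
      conv_lhs => rw [hsplit, hrec, ← strPow_succ, harith]

theorem strPow_of_comm (t : List Char) (ht : t ≠ []) (w : List Char) (hcomm : t ++ w = w ++ t)
    (hdvd : t.length ∣ w.length) : w = strPow t (w.length / t.length) :=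
  strPow_of_comm_aux t ht w.length w (le_refl _) hcomm hdvd

theorem strPow_of_rotate (s : List Char) (p : ℕ) (hp : 0 < p) (hpn : p ≤ s.length)
    (hdvd : p ∣ s.length) (h : s.rotate p = s) : s = strPow (s.take p) (s.length / p) := by
  have hlp : (s.take p).length = p := by rw [List.length_take]; omega
  have htne : s.take p ≠ [] := by
    rw [← List.length_pos_iff, hlp]; exact hp
  have hrot : s.drop p ++ s.take p = s := by
    rw [← List.rotate_eq_drop_append_take hpn]; exact h
  have hcomm : s.take p ++ s.drop p = s.drop p ++ s.take p := by
    rw [List.take_append_drop, hrot]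
  have hld : (s.drop p).length = s.length - p := by rw [List.length_drop]
  have hdvd' : (s.take p).length ∣ (s.drop p).length := by
    rw [hlp, hld]; exact Nat.dvd_sub hdvd dvd_rfl
  have hrec := strPow_of_comm (s.take p) htne (s.drop p) hcomm hdvd'
  have harith : (s.drop p).length / (s.take p).length + 1 = s.length / p := by
    rw [hlp, hld, ← Nat.add_div_right _ hp, Nat.sub_add_cancel hpn]
  conv_lhs => rw [← List.take_append_drop p s, hrec, ← strPow_succ, harith]

theorem exists_mul_mod_eq_gcd (j n : ℕ) (hj : 0 < j) (hjn : j < n) :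
    ∃ a : ℕ, (a * j) % n = Nat.gcd j n := by
  have hn : 0 < n := lt_trans hj hjn
  have hnz : (0:ℤ) < (n:ℤ) := by exact_mod_cast hn
  have hglt : Nat.gcd j n < n := lt_of_le_of_lt (Nat.le_of_dvd hj (Nat.gcd_dvd_left j n)) hjn
  have hbez : (Nat.gcd j n : ℤ) = (j:ℤ) * Int.gcdA j n + (n:ℤ) * Int.gcdB j n := by
    have h := Int.gcd_eq_gcd_ab (j:ℤ) (n:ℤ)
    rwa [Int.gcd_natCast_natCast] at h
  set a : ℤ := Int.gcdA j n % n with ha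
  have ha0 : 0 ≤ a := Int.emod_nonneg _ (by omega)
  -- (a * j) % n = gcd over ℤ
  have key : (a * (j:ℤ)) % (n:ℤ) = (Nat.gcd j n : ℤ) := by
    have h1 : (a * (j:ℤ)) % (n:ℤ) = (Int.gcdA j n * (j:ℤ)) % (n:ℤ) := by
      conv_rhs => rw [Int.mul_emod]
      rw [Int.mul_emod, ha, Int.emod_emod_of_dvd _ dvd_rfl]
    have h2 : (Int.gcdA j n * (j:ℤ)) % (n:ℤ) = (Nat.gcd j n : ℤ) % (n:ℤ) := by
      have : Int.gcdA j n * (j:ℤ) = (Nat.gcd j n : ℤ) - (n:ℤ) * Int.gcdB j n := by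
        rw [hbez]; ring
      rw [this, Int.sub_mul_emod_self_left]
    have h3 : (Nat.gcd j n : ℤ) % (n:ℤ) = (Nat.gcd j n : ℤ) := by
      apply Int.emod_eq_of_lt (by positivity) (by exact_mod_cast hglt)
    rw [h1, h2, h3]
  refine ⟨a.toNat, ?_⟩
  have : ((a.toNat * j) % n : ℕ) = ((Nat.gcd j n : ℕ) : ℤ) := by
    push_cast
    rw [Int.toNat_of_nonneg ha0]
    exact key
  exact_mod_cast this

theorem rotate_gcd (s : List Char) (j : ℕ) (hj : 0 < j) (hjn : j < s.length)
    (h : s.rotate j = s) : s.rotate (Nat.gcd j s.length) = s := by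
  have hmul : ∀ a : ℕ, s.rotate (a * j) = s := by
    intro a
    induction a with
    | zero => simp
    | succ a ih =>
      have : (a + 1) * j = a * j + j := by ring
      rw [this, ← List.rotate_rotate, ih, h]
  obtain ⟨a, ha⟩ := exists_mul_mod_eq_gcd j s.length hj hjn
  rw [← ha, List.rotate_mod, hmul]

theorem slice_one_neg_one (s : List Char) (hs : s ≠ []) :
    PySem.List.slice (s ++ s) (some 1) (some (-1)) =
      ((s ++ s).drop 1).take (2 * s.length - 2) := by
  have hn : 0 < s.length := List.length_pos_iff.mpr hs
  unfold PySem.List.slice PySem.List.clampIdx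
  simp only [List.length_append]
  norm_num
  have h1 : ¬ ((s.length : ℤ) + s.length < 1) := by omega
  rw [if_neg h1]
  have h2 : ((s.length : ℤ) + s.length + -1).toNat = 2 * s.length - 1 := by omega
  have h3 : min 1 (s.length + s.length) = 1 := by omega
  rw [h2, h3]
  rw [List.drop_one]
  congr 1

theorem take_drop_double (s : List Char) (j : ℕ) (hj : j ≤ s.length) :
    ((s ++ s).drop j).take s.length = s.rotate j := by
  rw [List.drop_append, Nat.sub_eq_zero_of_le hj, List.drop_zero,
    List.take_append, List.take_of_length_le (by rw [List.length_drop]; omega),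
    List.length_drop]
  have : s.length - (s.length - j) = j := by omega
  rw [this, List.rotate_eq_drop_append_take hj]

theorem isIn_iff_rotate (s : List Char) (hs : s ≠ []) :
    (PySem.Chars.isIn s (PySem.List.slice (s ++ s) (some 1) (some (-1))) = true ↔
      ∃ j : ℕ, 1 ≤ j ∧ j ≤ s.length - 1 ∧ s.rotate j = s) := by
  have hn : 0 < s.length := List.length_pos_iff.mpr hs
  rw [slice_one_neg_one s hs, PySem.Chars.isIn_iff_infix]
  have hmidlen : (((s ++ s).drop 1).take (2 * s.length - 2)).length = 2 * s.length - 2 := by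
    rw [List.length_take, List.length_drop, List.length_append]
    omega
  constructor
  · rintro ⟨u, v, huv⟩
    have hlen : u.length + (s.length + v.length) = 2 * s.length - 2 := by
      have h := congrArg List.length huv
      rw [hmidlen] at h
      simpa using h
    have hn2 : 2 ≤ s.length := by omega
    refine ⟨u.length + 1, by omega, by omega, ?_⟩
    rw [← take_drop_double s (u.length + 1) (by omega)]
    have hd1 : (s ++ s).drop (u.length + 1) = ((s ++ s).drop 1).drop u.length := by
      rw [List.drop_drop, Nat.add_comm]
    have hw : (s ++ s).drop 1 =
        (u ++ s ++ v) ++ ((s ++ s).drop 1).drop (2 * s.length - 2) := by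
      conv_lhs => rw [← List.take_append_drop (2 * s.length - 2) ((s ++ s).drop 1), ← huv]
    rw [hd1, hw, List.append_assoc (u ++ s) v, List.append_assoc u s,
      List.drop_left, List.take_left' rfl]
  · rintro ⟨j, hj1, hjn1, hrot⟩
    have hn2 : 2 ≤ s.length := by omega
    have hjn : j ≤ s.length := by omega
    have hds : s.drop j ++ s.take j = s := by
      rw [← List.rotate_eq_drop_append_take hjn]; exact hrot
    have key : s ++ s = s.take j ++ (s ++ s.drop j) := by
      calc s ++ s = (s.take j ++ s.drop j) ++ (s.take j ++ s.drop j) := by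
            rw [List.take_append_drop]
        _ = s.take j ++ ((s.drop j ++ s.take j) ++ s.drop j) := by
            simp only [List.append_assoc]
        _ = s.take j ++ (s ++ s.drop j) := by rw [hds]
    have hltj : (s.take j).length = j := by rw [List.length_take]; omega
    have h1j : 1 ≤ (s.take j).length := by omega
    have hA : ((s.take j).drop 1).length ≤ 2 * s.length - 2 := by
      rw [List.length_drop, hltj]; omega
    have hB : s.length ≤ 2 * s.length - 2 - ((s.take j).drop 1).length := by
      rw [List.length_drop, hltj]; omega
    conv_rhs => rw [key]
    rw [List.drop_append_of_le_length h1j, List.take_append, List.take_of_length_le hA,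
      List.take_append, List.take_of_length_le hB]
    exact ⟨(s.take j).drop 1, _, List.append_assoc _ _ _⟩

theorem rotate_iff_pow (s : List Char) (hs : s ≠ []) :
    ((∃ j : ℕ, 1 ≤ j ∧ j ≤ s.length - 1 ∧ s.rotate j = s) ↔
      (∃ p : ℕ, 0 < p ∧ p < s.length ∧ p ∣ s.length ∧ s = strPow (s.take p) (s.length / p))) := by
  have hn : 0 < s.length := List.length_pos_iff.mpr hs
  constructor
  · rintro ⟨j, hj1, hjn1, hrot⟩
    have hn2 : 2 ≤ s.length := by omega
    have hjn : j < s.length := by omega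
    set g := Nat.gcd j s.length with hg
    have hg0 : 0 < g := Nat.gcd_pos_of_pos_left _ hj1
    have hgj : g ≤ j := Nat.le_of_dvd hj1 (Nat.gcd_dvd_left _ _)
    have hgdvd : g ∣ s.length := Nat.gcd_dvd_right _ _
    have hrotg : s.rotate g = s := rotate_gcd s j hj1 hjn hrot
    exact ⟨g, hg0, by omega, hgdvd, strPow_of_rotate s g hg0 (by omega) hgdvd hrotg⟩
  · rintro ⟨p, hp0, hpn, hdvd, hpow⟩
    exact ⟨p, hp0, by omega, rotate_of_strPow s p hp0 (by omega) hdvd hpow⟩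

theorem anyA_iff (s : List Char) (hs : s ≠ []) :
    ((PySem.List.pyRange 1 (s.length : ℤ)).any (fun segment =>
        PySem.Int.mod (s.length : ℤ) segment == 0 &&
          ((PySem.Chars.count s (PySem.List.slice s (some 0) (some segment)) : ℤ)
            == PySem.Int.floordiv (s.length : ℤ) segment)) = true ↔
      (∃ p : ℕ, 0 < p ∧ p < s.length ∧ p ∣ s.length ∧ s = strPow (s.take p) (s.length / p))) := by
  rw [List.any_eq_true]
  constructor
  · rintro ⟨seg, hmem, hcond⟩
    rw [PySem.List.mem_pyRange_one] at hmem
    obtain ⟨h1, h2⟩ := hmem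
    have h0 : 0 ≤ seg := by omega
    set p := seg.toNat with hp
    have hseg : seg = (p : ℤ) := (Int.toNat_of_nonneg h0).symm
    have hp1 : 0 < p := by omega
    have hpn : p < s.length := by omega
    simp only [Bool.and_eq_true, beq_iff_eq] at hcond
    obtain ⟨hmod, hcount⟩ := hcond
    have hdvd : p ∣ s.length := by
      rw [PySem.Int.mod_eq_zero_iff_dvd, hseg] at hmod
      exact_mod_cast hmod
    have hslice : PySem.List.slice s (some 0) (some seg) = s.take p := by
      rw [PySem.List.slice_zero_start, PySem.List.slice_to _ h0]
    have hfd : PySem.Int.floordiv (s.length : ℤ) seg = ((s.length / p : ℕ) : ℤ) := by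
      rw [hseg, PySem.Int.floordiv, Int.fdiv_eq_ediv]
      simp only [Int.natCast_div]
      rw [if_pos (Or.inl (by positivity))]
      ring
    rw [hslice, hfd] at hcount
    have hcnt : PySem.Chars.count s (s.take p) = s.length / p := by exact_mod_cast hcount
    exact ⟨p, hp1, hpn, hdvd, (count_eq_iff s p hp1 (by omega) hs hdvd).mp hcnt⟩
  · rintro ⟨p, hp1, hpn, hdvd, hpow⟩
    refine ⟨(p : ℤ), ?_, ?_⟩
    · rw [PySem.List.mem_pyRange_one]
      constructor <;> [exact_mod_cast hp1; exact_mod_cast hpn]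
    · simp only [Bool.and_eq_true, beq_iff_eq]
      constructor
      · rw [PySem.Int.mod_eq_zero_iff_dvd]
        exact_mod_cast hdvd
      · have hslice : PySem.List.slice s (some 0) (some (p:ℤ)) = s.take p := by
          rw [PySem.List.slice_zero_start, PySem.List.slice_to _ (by positivity)]
          simp
        have hfd : PySem.Int.floordiv (s.length : ℤ) (p:ℤ) = ((s.length / p : ℕ) : ℤ) := by
          rw [PySem.Int.floordiv, Int.fdiv_eq_ediv]
          simp only [Int.natCast_div]
          rw [if_pos (Or.inl (by positivity))]
          ring
        rw [hslice, hfd]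
        exact_mod_cast (count_eq_iff s p hp1 (by omega) hs hdvd).mpr hpow

theorem toDigitsCore_length_ge (b : ℕ) :
    ∀ (fuel n : ℕ) (acc : List Char), (Nat.toDigitsCore b (fuel+1) n acc).length ≥ acc.length + 1 := by
  intro fuel
  induction fuel with
  | zero => intro n acc; simp [Nat.toDigitsCore]
  | succ f ih =>
    intro n acc
    rw [Nat.toDigitsCore]
    split
    · simp
    · exact le_trans (by simp) (ih _ _)

theorem toChars_ne_nil (n : ℤ) : PySem.Int.toChars n ≠ [] := by
  unfold PySem.Int.toChars
  split
  · simp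
  · unfold Nat.toDigits
    intro h
    have := toDigitsCore_length_ge 10 n.toNat n.toNat []
    rw [h] at this
    simp at this

theorem chars_main (s : List Char) (hs : s ≠ []) :
    ((PySem.List.pyRange 1 (s.length : ℤ)).any (fun segment =>
        PySem.Int.mod (s.length : ℤ) segment == 0 &&
          ((PySem.Chars.count s (PySem.List.slice s (some 0) (some segment)) : ℤ)
            == PySem.Int.floordiv (s.length : ℤ) segment)))
      = PySem.Chars.isIn s (PySem.List.slice (s ++ s) (some 1) (some (-1))) := by
  rw [Bool.eq_iff_iff, anyA_iff s hs, isIn_iff_rotate s hs, rotate_iff_pow s hs]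

-- ===== VERDICT (by name: the statement is the Claim_ definition above) =====
theorem hasSeveralRepeating_spec : Claim_equal_hasSeveralRepeating := by
  intro number _
  unfold Spec_hasSeveralRepeating hasSeveralRepeating hasSeveralRepeating_alt
  simp only [PySem.Str.count_eq, PySem.Str.isIn, PySem.Str.slice, String.toList_ofList,
    strConcat, PySem.Chars.slice_eq_listSlice, PySem.Str.len_eq]
  exact chars_main (PySem.Int.toStr number).toList
    (by rw [PySem.Int.toList_toStr]; exact toChars_ne_nil number)
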